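-- pv_equiv track=rewrite | github.com/ElReyZero/ReyBot | utils/ps2.py | name_to_server_ID
-- ===== SOURCE A (Python) =====
-- SERVER_IDS = {
--     1: "Connery",
--     3: "Helios",
--     10: "Miller",
--     13: "Cobalt",
--     17: "Emerald",
--     19: "Jaeger",
--     24: "Apex",
--     25: "Briggs",
--     40: "Soltech",
--     1000: "Genudine",
--     2000: "Ceres"
-- }
--
-- def name_to_server_ID(name, activeServer=True):
--     if activeServer:
--         for key in SERVER_IDS:
--             if name.capitalize() == SERVER_IDS[key] and key not in [3, 24, 25, 1000, 2000]:
--                 return key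
--     else:
--         for key in SERVER_IDS:
--             if name.capitalize() == SERVER_IDS[key]:
--                 return key
--     return None
-- ===== SOURCE B (Python) =====
-- SERVER_IDS = {
--     1: "Connery",
--     3: "Helios",
--     10: "Miller",
--     13: "Cobalt",
--     17: "Emerald",
--     19: "Jaeger",
--     24: "Apex",
--     25: "Briggs",
--     40: "Soltech",
--     1000: "Genudine",
--     2000: "Ceres"
-- }
--
-- def name_to_server_ID(name, activeServer=True):
--     # Direct branch table: no dict, no scan, no exclusion-set test;
--     # the active-server exclusion is folded into each branch.
--     match name.capitalize():
--         case "Connery":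
--             return 1
--         case "Helios":
--             return None if activeServer else 3
--         case "Miller":
--             return 10
--         case "Cobalt":
--             return 13
--         case "Emerald":
--             return 17
--         case "Jaeger":
--             return 19
--         case "Apex":
--             return None if activeServer else 24
--         case "Briggs":
--             return None if activeServer else 25
--         case "Soltech":
--             return 40
--         case "Genudine":
--             return None if activeServer else 1000
--         case "Ceres":
--             return None if activeServer else 2000
--         case _:
--             return None
-- ===== Notes on version B (the rewrite author's own statement) =====
-- stated objective: alternative
-- what changed: Eliminates the data-driven lookup altogether: instead of scanning the SERVER_IDS table with an in-loop exclusion-list membership test, B is a direct match/branch table on the capitalized name in which the active-server exclusion is folded into each excluded server's branch, so there is no table, no scan and no membership test at call time.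
import Mathlib
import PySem

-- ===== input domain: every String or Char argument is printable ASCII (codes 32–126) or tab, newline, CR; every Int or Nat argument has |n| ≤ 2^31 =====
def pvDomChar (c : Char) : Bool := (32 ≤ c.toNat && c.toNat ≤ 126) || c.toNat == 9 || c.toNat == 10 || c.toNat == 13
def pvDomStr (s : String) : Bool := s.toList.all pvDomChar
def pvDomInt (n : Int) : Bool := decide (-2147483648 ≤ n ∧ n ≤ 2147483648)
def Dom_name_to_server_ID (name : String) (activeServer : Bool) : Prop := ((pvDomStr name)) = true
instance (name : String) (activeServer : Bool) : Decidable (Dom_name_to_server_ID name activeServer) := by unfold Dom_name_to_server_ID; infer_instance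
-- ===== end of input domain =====

-- B replaces A's table scan with a direct branch table on the capitalized name,
-- the active-server exclusion folded into each excluded server's branch (alternative decomposition).
-- ===== PORT A =====
-- str.capitalize(): first char uppercased, rest lowercased (exact on ASCII).
def pyCapitalize (s : String) : String :=
  match s.toList with
  | [] => ""
  | c :: rest => String.ofList (PySem.Chars.upperChar c :: PySem.Chars.lower rest)

def SERVER_IDS : List (Int × String) :=
  [(1, "Connery"), (3, "Helios"), (10, "Miller"), (13, "Cobalt"), (17, "Emerald"),
   (19, "Jaeger"), (24, "Apex"), (25, "Briggs"), (40, "Soltech"), (1000, "Genudine"),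
   (2000, "Ceres")]

-- 'for key in SERVER_IDS: if name.capitalize() == SERVER_IDS[key] and key not in [...]: return key'
-- (name.capitalize() is pure, so the port passes its value 'cap' to the loop)
def aLoopActive (cap : String) : List (Int × String) → Option Int
  | [] => none
  | (k, v) :: rest =>
    if cap == v && !(([3, 24, 25, 1000, 2000] : List Int).contains k) then some k
    else aLoopActive cap rest

-- 'for key in SERVER_IDS: if name.capitalize() == SERVER_IDS[key]: return key'
def aLoopAll (cap : String) : List (Int × String) → Option Int
  | [] => none
  | (k, v) :: rest =>
    if cap == v then some k else aLoopAll cap rest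

def name_to_server_ID (name : String) (activeServer : Bool) : Option Int :=
  if activeServer then aLoopActive (pyCapitalize name) SERVER_IDS
  else aLoopAll (pyCapitalize name) SERVER_IDS

-- ===== PORT B =====
-- 'match name.capitalize(): case "Connery": return 1 | case "Helios": return None if activeServer else 3 | …'
def name_to_server_ID_alt (name : String) (activeServer : Bool) : Option Int :=
  let cap := pyCapitalize name
  if cap == "Connery" then some 1
  else if cap == "Helios" then (if activeServer then none else some 3)
  else if cap == "Miller" then some 10
  else if cap == "Cobalt" then some 13
  else if cap == "Emerald" then some 17
  else if cap == "Jaeger" then some 19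
  else if cap == "Apex" then (if activeServer then none else some 24)
  else if cap == "Briggs" then (if activeServer then none else some 25)
  else if cap == "Soltech" then some 40
  else if cap == "Genudine" then (if activeServer then none else some 1000)
  else if cap == "Ceres" then (if activeServer then none else some 2000)
  else none

-- ===== PRECONDITION & SPEC =====
def Spec_name_to_server_ID (name : String) (activeServer : Bool) (out : Option Int) : Prop := out = name_to_server_ID_alt name activeServer
instance (name : String) (activeServer : Bool) (out : Option Int) : Decidable (Spec_name_to_server_ID name activeServer out) := by unfold Spec_name_to_server_ID; infer_instance

-- ===== CLAIM =====
def Claim_equal_name_to_server_ID : Prop := ∀ (name : String) (activeServer : Bool), Dom_name_to_server_ID name activeServer → Spec_name_to_server_ID name activeServer (name_to_server_ID name activeServer)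

-- ===== LEMMAS AND PROOFS =====
theorem core_eq (t : String) (b : Bool) :
    (if b then aLoopActive t SERVER_IDS else aLoopAll t SERVER_IDS) =
    (if t == "Connery" then some 1
     else if t == "Helios" then (if b then none else some 3)
     else if t == "Miller" then some 10
     else if t == "Cobalt" then some 13
     else if t == "Emerald" then some 17
     else if t == "Jaeger" then some 19
     else if t == "Apex" then (if b then none else some 24)
     else if t == "Briggs" then (if b then none else some 25)
     else if t == "Soltech" then some 40
     else if t == "Genudine" then (if b then none else some 1000)
     else if t == "Ceres" then (if b then none else some 2000)
     else none) := by
  cases b <;>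
    simp only [aLoopActive, aLoopAll, SERVER_IDS, List.contains, if_true,
      Bool.and_eq_true, beq_iff_eq] <;>
    by_cases h1 : t = "Connery" <;> simp [h1] <;>
    by_cases h2 : t = "Helios" <;> simp [h2] <;>
    by_cases h3 : t = "Miller" <;> simp [h3] <;>
    by_cases h4 : t = "Cobalt" <;> simp [h4] <;>
    by_cases h5 : t = "Emerald" <;> simp [h5] <;>
    by_cases h6 : t = "Jaeger" <;> simp [h6] <;>
    by_cases h7 : t = "Apex" <;> simp [h7] <;>
    by_cases h8 : t = "Briggs" <;> simp [h8] <;>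
    by_cases h9 : t = "Soltech" <;> simp [h9]

-- ===== VERDICT =====
theorem name_to_server_ID_spec : Claim_equal_name_to_server_ID := by
  intro name activeServer _
  unfold Spec_name_to_server_ID name_to_server_ID name_to_server_ID_alt
  exact core_eq (pyCapitalize name) activeServer
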